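-- pv_equiv track=rewrite | github.com/annkry/nonogram_first_method | main.py | flip_num
-- ===== SOURCE A (Python) =====
-- def flip_num(list2, num):
--     num_of_one = 0  # the number of ones in a 0/1 sequence
--     i = 0
--     maxoneakt = 0   # current number of ones in strings of length D
--     maxone = 0      # maximum number of ones in length D
--     for j in range(0, len(list2)):
--         if list2[j] == 1:
--             num_of_one += 1
--     while i != len(list2) - num + 1:
--         maxoneakt = 0
--         for j in range(i, i + num):
--             if list2[j] == 1:
--                 maxoneakt += 1
--         if maxoneakt > maxone:
--             maxone = maxoneakt
--         i += 1
--     return num - maxone + num_of_one - maxone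
-- ===== SOURCE B (Python) =====
-- def flip_num(list2, num):
--     # prefix sums of ones: pref[k] = number of ones among the first k elements
--     pref = [0]
--     cur = 0
--     for x in list2:
--         cur += (x == 1)
--         pref.append(cur)
--     total = cur
--     best = 0
--     if num > 0:
--         for i in range(len(list2) - num + 1):
--             s = pref[i + num] - pref[i]
--             if s > best:
--                 best = s
--     return num + total - 2 * best
-- ===== Notes on version B (the rewrite author's own statement) =====
-- stated objective: faster
-- what changed: B builds a one-pass prefix-sum array of ones and reads each window's ones count as a difference of two prefix sums, replacing A's rescan of every length-num window.
import Mathlib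
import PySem

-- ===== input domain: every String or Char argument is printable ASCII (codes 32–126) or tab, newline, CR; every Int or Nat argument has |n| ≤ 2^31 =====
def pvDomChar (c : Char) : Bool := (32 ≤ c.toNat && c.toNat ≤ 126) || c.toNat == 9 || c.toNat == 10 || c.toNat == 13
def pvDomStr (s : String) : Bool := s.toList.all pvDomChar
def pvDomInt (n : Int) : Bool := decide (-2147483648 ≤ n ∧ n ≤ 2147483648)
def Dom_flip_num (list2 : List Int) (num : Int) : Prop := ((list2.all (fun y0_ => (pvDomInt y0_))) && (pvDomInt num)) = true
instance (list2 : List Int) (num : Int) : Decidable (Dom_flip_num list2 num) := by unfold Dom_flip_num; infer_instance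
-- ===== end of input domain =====

-- B replaces A's per-window rescan by a prefix-sum array of ones, reading each window count
-- as a difference of two prefix sums (objective: faster, one pass instead of n*num work).

-- ===== PORT A =====
def flip_num (list2 : List Int) (num : Int) : Int :=
  let num_of_one : Int :=
    (PySem.List.pyRange 0 (list2.length : Int) 1).foldl
      (fun acc j => if PySem.List.pyGetD list2 j 0 == 1 then acc + 1 else acc) 0
  let maxone : Int :=
    (PySem.List.pyRange 0 ((list2.length : Int) - num + 1) 1).foldl
      (fun maxone i =>
        let maxoneakt : Int :=
          (PySem.List.pyRange i (i + num) 1).foldl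
            (fun acc j => if PySem.List.pyGetD list2 j 0 == 1 then acc + 1 else acc) 0
        if maxoneakt > maxone then maxoneakt else maxone) 0
  num - maxone + num_of_one - maxone

-- ===== PORT B =====
def flip_num_alt (list2 : List Int) (num : Int) : Int :=
  let pc : List Int × Int :=
    list2.foldl
      (fun pc x =>
        let cur := pc.2 + (if x == 1 then (1 : Int) else 0)
        (pc.1 ++ [cur], cur))
      ([0], 0)
  let pref : List Int := pc.1
  let total : Int := pc.2
  let best : Int :=
    if num > 0 then
      (PySem.List.pyRange 0 ((list2.length : Int) - num + 1) 1).foldl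
        (fun best i =>
          let s := PySem.List.pyGetD pref (i + num) 0 - PySem.List.pyGetD pref i 0
          if s > best then s else best) 0
    else 0
  num + total - 2 * best

-- ===== PRECONDITION & SPEC =====
-- A's while loop stops only when i reaches len(list2) - num + 1; for num > len + 1 that
-- stop index is negative, the loop overruns and raises IndexError, so Pre_ excludes it.
def Pre_flip_num (list2 : List Int) (num : Int) : Prop := num ≤ (list2.length : Int) + 1
instance (list2 : List Int) (num : Int) : Decidable (Pre_flip_num list2 num) := by
  unfold Pre_flip_num; infer_instance

def pvWitness_flip_num : List Int × Int := ([1, 0, 1, 1], 2)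

def Spec_flip_num (list2 : List Int) (num : Int) (out : Int) : Prop := out = flip_num_alt list2 num
instance (list2 : List Int) (num : Int) (out : Int) : Decidable (Spec_flip_num list2 num out) := by
  unfold Spec_flip_num; infer_instance

-- ===== CLAIM (what is proved, stated in full; the proofs are below) =====
def Claim_equal_flip_num : Prop := ∀ (list2 : List Int) (num : Int), Dom_flip_num list2 num → Pre_flip_num list2 num → Spec_flip_num list2 num (flip_num list2 num)

-- ===== LEMMAS AND PROOFS =====

def onesUpTo (l : List Int) (k : Nat) : Int := ((l.take k).count 1 : Int)

theorem pref_snd (l : List Int) (p : List Int) (c : Int) :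
    (l.foldl (fun pc x =>
        let cur := pc.2 + (if x == 1 then (1 : Int) else 0)
        (pc.1 ++ [cur], cur)) (p, c)).2 = c + (l.count 1 : Int) := by
  induction l generalizing p c with
  | nil => simp
  | cons x t ih =>
    simp only [List.foldl_cons, ih, List.count_cons]
    by_cases hx : x == 1 <;> simp [hx] <;> push_cast <;> ring

theorem pref_fst (l : List Int) (p : List Int) (c : Int) :
    (l.foldl (fun pc x =>
        let cur := pc.2 + (if x == 1 then (1 : Int) else 0)
        (pc.1 ++ [cur], cur)) (p, c)).1 =
      p ++ (List.range l.length).map (fun k => c + ((l.take (k + 1)).count 1 : Int)) := by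
  induction l generalizing p c with
  | nil => simp
  | cons x t ih =>
    simp only [List.foldl_cons, ih, List.length_cons, List.range_succ_eq_map]
    simp only [List.map_cons, List.map_map, List.append_assoc, List.singleton_append]
    congr 1
    congr 1
    · by_cases hx : x = 1 <;> simp [hx, List.count_singleton]
    · apply List.map_congr_left
      intro k _
      simp only [Function.comp, List.take_succ_cons, List.count_cons]
      by_cases hx : x = 1 <;> simp [hx] <;> push_cast <;> ring

theorem pref_get (l : List Int) (k : Int) (h0 : 0 ≤ k) (h1 : k ≤ (l.length : Int)) :
    PySem.List.pyGetD
      ((0 : Int) :: (List.range l.length).map (fun k => ((l.take (k + 1)).count 1 : Int))) k 0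
      = onesUpTo l k.toNat := by
  rw [show k = ((k.toNat : Nat) : Int) from (Int.toNat_of_nonneg h0).symm,
      PySem.List.pyGetD_natCast]
  have hk : k.toNat ≤ l.length := by omega
  generalize hj : k.toNat = j at hk ⊢
  cases j with
  | zero => simp [onesUpTo]
  | succ j =>
    have hjl : j < l.length := by omega
    rw [List.getD_cons_succ, List.getD_eq_getElem _ _ (by simpa using hjl),
        List.getElem_map, List.getElem_range]
    simp [onesUpTo]

theorem sum0 (l : List Int) (m : Int) (h0 : 0 ≤ m) (hm : m ≤ (l.length : Int)) :
    ((PySem.List.pyRange 0 m 1).map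
        (fun j => if PySem.List.pyGetD l j 0 == 1 then (1 : Int) else 0)).sum
      = onesUpTo l m.toNat := by
  have hlen : ((l.take m.toNat).length : Int) = m := by
    simp [List.length_take]; omega
  have hcongr : (PySem.List.pyRange 0 m 1).map
        (fun j => if PySem.List.pyGetD l j 0 == 1 then (1 : Int) else 0)
      = (PySem.List.pyRange 0 m 1).map
        (fun j => if PySem.List.pyGetD (l.take m.toNat) j 0 == 1 then (1 : Int) else 0) := by
    apply List.map_congr_left
    intro j hj
    rw [PySem.List.mem_pyRange_one] at hj
    rw [PySem.List.pyGetD_eq_getElem l 0 hj.1 (by omega),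
        PySem.List.pyGetD_eq_getElem (l.take m.toNat) 0 hj.1 (by omega)]
    congr 1
    rw [List.getElem_take]
  rw [hcongr]
  have : (PySem.List.pyRange 0 m 1).map
        (fun j => if PySem.List.pyGetD (l.take m.toNat) j 0 == 1 then (1 : Int) else 0)
      = ((PySem.List.pyRange 0 m 1).map
          (fun j => PySem.List.pyGetD (l.take m.toNat) j 0)).map
          (fun x => if x == 1 then (1 : Int) else 0) := by
    rw [List.map_map]; rfl
  have hrange : PySem.List.pyRange 0 m = PySem.List.pyRange 0 ((l.take m.toNat).length : Int) := by
    rw [hlen]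
  rw [this, hrange, PySem.List.map_pyGetD_pyRange_zero',
      PySem.List.sum_map_ite_one_zero]
  simp [onesUpTo, List.count]

theorem window_count (l : List Int) (a b : Int) (h0 : 0 ≤ a) (hab : a ≤ b)
    (hb : b ≤ (l.length : Int)) :
    (PySem.List.pyRange a b 1).foldl
        (fun acc j => if PySem.List.pyGetD l j 0 == 1 then acc + 1 else acc) 0
      = onesUpTo l b.toNat - onesUpTo l a.toNat := by
  rw [PySem.List.foldl_congr_mem _ _
        (fun acc j => acc + if PySem.List.pyGetD l j 0 == 1 then (1 : Int) else 0) _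
        (by intro acc x _; dsimp only; split <;> omega),
      PySem.List.foldl_add]
  have := PySem.List.pyRange_one_append 0 a b h0 hab
  have hsum : ((PySem.List.pyRange 0 b 1).map
        (fun j => if PySem.List.pyGetD l j 0 == 1 then (1 : Int) else 0)).sum
      = ((PySem.List.pyRange 0 a 1).map
          (fun j => if PySem.List.pyGetD l j 0 == 1 then (1 : Int) else 0)).sum
        + ((PySem.List.pyRange a b 1).map
          (fun j => if PySem.List.pyGetD l j 0 == 1 then (1 : Int) else 0)).sum := by
    rw [this, List.map_append, List.sum_append]
  rw [sum0 l a h0 (by omega), sum0 l b (by omega) hb] at hsum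
  omega

theorem foldl_max_zero (l : List Int) :
    l.foldl (fun (m : Int) (_ : Int) => if (0 : Int) > m then 0 else m) 0 = 0 := by
  induction l with
  | nil => rfl
  | cons x t ih => simpa using ih

theorem flip_num_eq (list2 : List Int) (num : Int) (hpre : num ≤ (list2.length : Int) + 1) :
    flip_num list2 num = flip_num_alt list2 num := by
  unfold flip_num flip_num_alt
  simp only []
  -- total ones
  rw [PySem.List.foldl_pyRange_zero_pyGetD' list2 0
        (fun acc x => if x == 1 then acc + 1 else acc) 0,
      PySem.List.foldl_beq_add_one, pref_snd, pref_fst]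
  simp only [zero_add, List.singleton_append]
  by_cases hnum : num > 0
  · rw [if_pos hnum]
    have hfold :
        (PySem.List.pyRange 0 ((list2.length : Int) - num + 1) 1).foldl
          (fun maxone i =>
            let maxoneakt : Int :=
              (PySem.List.pyRange i (i + num) 1).foldl
                (fun acc j => if PySem.List.pyGetD list2 j 0 == 1 then acc + 1 else acc) 0
            if maxoneakt > maxone then maxoneakt else maxone) 0
        = (PySem.List.pyRange 0 ((list2.length : Int) - num + 1) 1).foldl
          (fun best i =>
            let s := PySem.List.pyGetD
                ((0 : Int) :: (List.range list2.length).map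
                  (fun k => ((list2.take (k + 1)).count 1 : Int))) (i + num) 0
              - PySem.List.pyGetD
                ((0 : Int) :: (List.range list2.length).map
                  (fun k => ((list2.take (k + 1)).count 1 : Int))) i 0
            if s > best then s else best) 0 := by
      apply PySem.List.foldl_congr_mem
      intro acc i hi
      rw [PySem.List.mem_pyRange_one] at hi
      dsimp only
      rw [window_count list2 i (i + num) hi.1 (by omega) (by omega),
          pref_get list2 i hi.1 (by omega),
          pref_get list2 (i + num) (by omega) (by omega)]
    rw [hfold]
    dsimp only
    ring
  · rw [if_neg hnum]
    push_neg at hnum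
    have hfold :
        (PySem.List.pyRange 0 ((list2.length : Int) - num + 1) 1).foldl
          (fun maxone i =>
            let maxoneakt : Int :=
              (PySem.List.pyRange i (i + num) 1).foldl
                (fun acc j => if PySem.List.pyGetD list2 j 0 == 1 then acc + 1 else acc) 0
            if maxoneakt > maxone then maxoneakt else maxone) 0 = 0 := by
      rw [PySem.List.foldl_congr_mem _ _
            (fun (m : Int) (_ : Int) => if (0 : Int) > m then 0 else m) 0 ?_,
          foldl_max_zero]
      intro acc i _
      dsimp only
      rw [PySem.List.pyRange_one_eq_nil (by omega)]
      simp
    rw [hfold]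
    ring

-- ===== VERDICT (by name: the statement is the Claim_ definition above) =====
theorem flip_num_spec : Claim_equal_flip_num := by
  intro list2 num _ hpre
  unfold Pre_flip_num at hpre
  unfold Spec_flip_num
  exact flip_num_eq list2 num hpre
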